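-- pv_equiv track=rewrite | github.com/ZJU-CTAG/CCRep | utils/allennlp_utils/extract_utils.py | extract_add_and_del_lines_v3
-- ===== SOURCE A (Python) =====
-- def extract_add_and_del_lines_v3(diff,
--                                  line_separator=' ',
--                                  join=True):
--     # line = line.strip()
--     code_lines = diff.split('<nl>') # NOTE: stop removing file names // [2:]  # drop edit(add/delete) file names
--     code_lines = [l.strip() for l in code_lines]
--     if code_lines[-1] == '':  # drop last empty line
--         code_lines = code_lines[:-1]
--
--     add_lines = []
--     del_lines = []
--     for line in code_lines:
--         if line.startswith('mmm a'):
--             add_lines.append(line)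
--         elif line.startswith('ppp b'):
--             del_lines.append(line)
--         elif line.startswith('+'):
--             if len(line) > 1:  # drop empty add line
--                 add_lines.append(line[1:])
--         elif line.startswith('-'):  # drop empty delete line
--             if len(line) > 1:
--                 del_lines.append(line[1:])
--         else:  # add common line to both code line lists
--             add_lines.append(line)
--             del_lines.append(line)
--
--     if join:
--         return line_separator.join(add_lines), line_separator.join(del_lines)
--     else:
--         return add_lines, del_lines
-- ===== SOURCE B (Python) =====
-- def _keep_add(line):
--     if line.startswith('mmm a'):
--         return line
--     if line.startswith('ppp b'):
--         return None
--     if line.startswith('+'):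
--         return line[1:] if len(line) > 1 else None
--     if line.startswith('-'):
--         return None
--     return line
--
--
-- def _keep_del(line):
--     if line.startswith('mmm a'):
--         return None
--     if line.startswith('ppp b'):
--         return line
--     if line.startswith('+'):
--         return None
--     if line.startswith('-'):
--         return line[1:] if len(line) > 1 else None
--     return line
--
--
-- def extract_add_and_del_lines_v3(diff,
--                                  line_separator=' ',
--                                  join=True):
--     code_lines = [l.strip() for l in diff.split('<nl>')]
--     if code_lines[-1] == '':
--         code_lines = code_lines[:-1]
--     add_lines = [r for r in map(_keep_add, code_lines) if r is not None]
--     del_lines = [r for r in map(_keep_del, code_lines) if r is not None]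
--     if join:
--         return line_separator.join(add_lines), line_separator.join(del_lines)
--     else:
--         return add_lines, del_lines
-- ===== Notes on version B (the rewrite author's own statement) =====
-- stated objective: alternative
-- what changed: Replaces the single simultaneous loop appending to two accumulators with two independent filtering passes (a keep/transform helper per side mapped over the lines), sharing only the preprocessing.
-- outside the precondition, e.g. on extract_add_and_del_lines_v3('a', ' ', False): A returns (['a'], ['a']), B returns (['a'], ['a'])
import Mathlib
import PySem

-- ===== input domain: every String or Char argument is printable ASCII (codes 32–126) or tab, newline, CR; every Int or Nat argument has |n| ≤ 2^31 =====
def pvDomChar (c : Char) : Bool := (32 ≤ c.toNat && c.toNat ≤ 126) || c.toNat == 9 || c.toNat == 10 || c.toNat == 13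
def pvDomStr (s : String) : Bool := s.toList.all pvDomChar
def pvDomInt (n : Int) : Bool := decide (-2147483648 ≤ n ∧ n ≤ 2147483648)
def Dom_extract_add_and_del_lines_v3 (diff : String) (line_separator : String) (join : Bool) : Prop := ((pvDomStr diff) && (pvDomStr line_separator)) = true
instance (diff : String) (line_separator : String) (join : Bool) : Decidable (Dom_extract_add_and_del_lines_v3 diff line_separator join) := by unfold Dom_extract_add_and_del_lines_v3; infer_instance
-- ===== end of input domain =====

-- B computes add/del lines in two independent filtering passes instead of A's single
-- simultaneous two-accumulator loop (objective: alternative decomposition, same cost).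
-- Pre_ excludes join = false, where the Python returns a pair of LISTS, not of strings
-- (outside the declared return type String × String).


-- ===== PORT A =====
def extract_add_and_del_lines_v3 (diff : String) (line_separator : String) (join : Bool) : String × String :=
  let code_lines := (PySem.Str.split? diff "<nl>").getD []
  let code_lines := code_lines.map (fun l => PySem.Str.strip l)
  let code_lines :=
    if PySem.List.pyGet? code_lines (-1) = some "" then PySem.List.slice code_lines none (some (-1))
    else code_lines
  let r := code_lines.foldl (fun (acc : List String × List String) line =>
      if PySem.Str.startswith line "mmm a" then (acc.1 ++ [line], acc.2)
      else if PySem.Str.startswith line "ppp b" then (acc.1, acc.2 ++ [line])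
      else if PySem.Str.startswith line "+" then
        (if PySem.Str.len line > 1 then (acc.1 ++ [PySem.Str.slice line (some 1) none], acc.2) else acc)
      else if PySem.Str.startswith line "-" then
        (if PySem.Str.len line > 1 then (acc.1, acc.2 ++ [PySem.Str.slice line (some 1) none]) else acc)
      else (acc.1 ++ [line], acc.2 ++ [line])) ([], [])
  if join then (PySem.Str.join line_separator r.1, PySem.Str.join line_separator r.2)
  else ("", "")  -- unreachable under Pre_ (Python returns lists here)

-- ===== PORT B =====
def pvKeepAdd (line : String) : Option String :=
  if PySem.Str.startswith line "mmm a" then some line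
  else if PySem.Str.startswith line "ppp b" then none
  else if PySem.Str.startswith line "+" then
    (if PySem.Str.len line > 1 then some (PySem.Str.slice line (some 1) none) else none)
  else if PySem.Str.startswith line "-" then none
  else some line

def pvKeepDel (line : String) : Option String :=
  if PySem.Str.startswith line "mmm a" then none
  else if PySem.Str.startswith line "ppp b" then some line
  else if PySem.Str.startswith line "+" then none
  else if PySem.Str.startswith line "-" then
    (if PySem.Str.len line > 1 then some (PySem.Str.slice line (some 1) none) else none)
  else some line

def extract_add_and_del_lines_v3_alt (diff : String) (line_separator : String) (join : Bool) : String × String :=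
  let code_lines := ((PySem.Str.split? diff "<nl>").getD []).map (fun l => PySem.Str.strip l)
  let code_lines :=
    if PySem.List.pyGet? code_lines (-1) = some "" then PySem.List.slice code_lines none (some (-1))
    else code_lines
  let add_lines := code_lines.filterMap pvKeepAdd
  let del_lines := code_lines.filterMap pvKeepDel
  if join then (PySem.Str.join line_separator add_lines, PySem.Str.join line_separator del_lines)
  else ("", "")  -- unreachable under Pre_ (Python returns lists here)

-- ===== PRECONDITION & SPEC =====
-- Pre_ excludes join = false, on which the Python returns a pair of lists — a value
-- outside the declared return type String × String.
def Pre_extract_add_and_del_lines_v3 (diff : String) (line_separator : String) (join : Bool) : Prop := join = true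
instance (diff : String) (line_separator : String) (join : Bool) : Decidable (Pre_extract_add_and_del_lines_v3 diff line_separator join) := by unfold Pre_extract_add_and_del_lines_v3; infer_instance

def pvWitness_extract_add_and_del_lines_v3 : String × String × Bool := ("mmm a x<nl>+foo<nl>-bar<nl>ctx", " ", true)

def Spec_extract_add_and_del_lines_v3 (diff : String) (line_separator : String) (join : Bool) (out : String × String) : Prop := out = extract_add_and_del_lines_v3_alt diff line_separator join
instance (diff : String) (line_separator : String) (join : Bool) (out : String × String) : Decidable (Spec_extract_add_and_del_lines_v3 diff line_separator join out) := by unfold Spec_extract_add_and_del_lines_v3; infer_instance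

-- ===== CLAIM (what is proved, stated in full; the proofs are below) =====
def Claim_equal_extract_add_and_del_lines_v3 : Prop := ∀ (diff : String) (line_separator : String) (join : Bool), Dom_extract_add_and_del_lines_v3 diff line_separator join → Pre_extract_add_and_del_lines_v3 diff line_separator join → Spec_extract_add_and_del_lines_v3 diff line_separator join (extract_add_and_del_lines_v3 diff line_separator join)

-- ===== LEMMAS AND PROOFS =====

-- A's simultaneous fold equals the two filterMap passes (loop invariant over the accumulator pair).
theorem pv_fold_eq (ls : List String) (a d : List String) :
    ls.foldl (fun (acc : List String × List String) line =>
      if PySem.Str.startswith line "mmm a" then (acc.1 ++ [line], acc.2)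
      else if PySem.Str.startswith line "ppp b" then (acc.1, acc.2 ++ [line])
      else if PySem.Str.startswith line "+" then
        (if PySem.Str.len line > 1 then (acc.1 ++ [PySem.Str.slice line (some 1) none], acc.2) else acc)
      else if PySem.Str.startswith line "-" then
        (if PySem.Str.len line > 1 then (acc.1, acc.2 ++ [PySem.Str.slice line (some 1) none]) else acc)
      else (acc.1 ++ [line], acc.2 ++ [line])) (a, d)
    = (a ++ ls.filterMap pvKeepAdd, d ++ ls.filterMap pvKeepDel) := by
  induction ls generalizing a d with
  | nil => simp
  | cons l t ih =>
    simp only [List.foldl_cons, List.filterMap_cons, pvKeepAdd, pvKeepDel]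
    split_ifs <;> simp only [ih] <;> simp [pvKeepAdd, pvKeepDel]

theorem extract_add_and_del_lines_v3_spec : Claim_equal_extract_add_and_del_lines_v3 := by
  intro diff line_separator join _ hpre
  unfold Spec_extract_add_and_del_lines_v3
  subst hpre
  simp only [extract_add_and_del_lines_v3, extract_add_and_del_lines_v3_alt, pv_fold_eq,
    List.nil_append, if_true]
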